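-- pv_equiv track=rewrite | github.com/scogliani/ArtificialIntelligenceLabs | lab1/lab1/draw_labyrinth.py | draw_labyrinth
-- ===== SOURCE A (Python) =====
-- from typing import List, Tuple
--
-- def draw_labyrinth(labyrinth: List[List[int]], path: List[Tuple[int, int]]
--                    ) -> str:
--   """! Output a labyrinth integer matrix to a terminal with '##' for representing 0,
--   and '  ' for representing 1. A path is also draw from the path (represented
--   by '. '
--   @param labyrinth A list of list representing a labyrinth matrix
--   @param path A list representing the way used
--
--   @return The matrix drawn
--   """
--   return "".join(
--           ["".join(
--             [". " if (j, i) in path else "##" if col == 0 else "  "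
--               for j, col in enumerate(row)
--             ] + ["\n"]
--             ) for i, row in enumerate(labyrinth)
--           ]
--         )
-- ===== SOURCE B (Python) =====
-- from typing import List, Tuple
--
-- def draw_labyrinth(labyrinth: List[List[int]], path: List[Tuple[int, int]]
--                    ) -> str:
--   grid = [["##" if col == 0 else "  " for col in row] for row in labyrinth]
--   for (j, i) in path:
--     if 0 <= i < len(grid) and 0 <= j < len(grid[i]):
--       grid[i][j] = ". "
--   return "".join("".join(row) + "\n" for row in grid)
-- ===== Notes on version B (the rewrite author's own statement) =====
-- stated objective: faster
-- what changed: Replaces the per-cell 'in path' list-membership test with one grid-building pass followed by a bounds-checked scatter pass over the path coordinates, then a join.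
import Mathlib
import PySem

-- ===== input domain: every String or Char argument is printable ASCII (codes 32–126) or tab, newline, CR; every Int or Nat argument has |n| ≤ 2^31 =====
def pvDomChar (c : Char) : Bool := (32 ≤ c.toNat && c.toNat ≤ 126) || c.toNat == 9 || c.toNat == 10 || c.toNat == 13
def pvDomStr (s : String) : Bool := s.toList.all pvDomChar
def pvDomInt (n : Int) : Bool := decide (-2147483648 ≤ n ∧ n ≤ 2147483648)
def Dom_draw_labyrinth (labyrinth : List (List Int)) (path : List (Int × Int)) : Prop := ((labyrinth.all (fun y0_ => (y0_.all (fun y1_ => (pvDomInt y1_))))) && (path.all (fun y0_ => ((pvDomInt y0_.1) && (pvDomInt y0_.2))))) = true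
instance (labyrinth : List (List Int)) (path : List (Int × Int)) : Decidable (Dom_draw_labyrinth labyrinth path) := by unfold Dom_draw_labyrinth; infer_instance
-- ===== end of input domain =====

-- B replaces A's per-cell membership scan of `path` with one grid-building pass plus a
-- bounds-checked scatter pass over `path` (faster: O(R*C + |path|) instead of O(R*C*|path|)).

-- ===== PORT A =====
-- literal transliteration of A's nested comprehension with per-cell `(j, i) in path` test
def draw_labyrinth (labyrinth : List (List Int)) (path : List (Int × Int)) : String :=
  PySem.Str.join "" ((PySem.List.enumerate labyrinth).map (fun p =>
    PySem.Str.join "" (((PySem.List.enumerate p.2).map (fun q =>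
      if (q.1, p.1) ∈ path then ". " else if q.2 == 0 then "##" else "  ")) ++ ["\n"])))

-- ===== PORT B =====
def pvWall (col : Int) : String := if col == 0 then "##" else "  "

-- one scatter step: `if 0 <= i < len(grid) and 0 <= j < len(grid[i]): grid[i][j] = ". "`
def pvScatter (g : List (List String)) (q : Int × Int) : List (List String) :=
  if 0 ≤ q.2 ∧ q.2 < (g.length : Int) ∧ 0 ≤ q.1 ∧ q.1 < ((g[q.2.toNat]?.getD []).length : Int)
  then g.modify q.2.toNat (fun row => row.set q.1.toNat ". ")
  else g

def draw_labyrinth_alt (labyrinth : List (List Int)) (path : List (Int × Int)) : String :=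
  PySem.Str.join ""
    ((path.foldl pvScatter (labyrinth.map (fun row => row.map pvWall))).map
      (fun row => PySem.Str.join "" row ++ "\n"))

-- ===== PRECONDITION & SPEC =====
def Spec_draw_labyrinth (labyrinth : List (List Int)) (path : List (Int × Int)) (out : String) : Prop := out = draw_labyrinth_alt labyrinth path
instance (labyrinth : List (List Int)) (path : List (Int × Int)) (out : String) : Decidable (Spec_draw_labyrinth labyrinth path out) := by unfold Spec_draw_labyrinth; infer_instance

-- ===== CLAIM (what is proved, stated in full; the proofs are below) =====
def Claim_equal_draw_labyrinth : Prop := ∀ (labyrinth : List (List Int)) (path : List (Int × Int)), Dom_draw_labyrinth labyrinth path → Spec_draw_labyrinth labyrinth path (draw_labyrinth labyrinth path)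

-- ===== LEMMAS AND PROOFS =====

def cellGet (g : List (List String)) (i j : Nat) : Option String :=
  g[i]?.bind (fun r => r[j]?)

theorem scatter_cell (g : List (List String)) (q : Int × Int) (i j : Nat) :
    cellGet (pvScatter g q) i j =
      if q = ((j : Int), (i : Int)) ∧ (cellGet g i j).isSome then some ". "
      else cellGet g i j := by
  unfold pvScatter cellGet
  split
  · rename_i hc
    obtain ⟨h2, hlen, h1, hrow⟩ := hc
    rw [List.getElem?_modify]
    by_cases hi : q.2.toNat = i
    · have hgl : i < g.length := by omega
      have hr : g[i]? = some g[i] := List.getElem?_eq_getElem hgl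
      rw [hi, hr] at hrow
      simp only [Option.getD_some] at hrow
      have hrowlen : q.1.toNat < g[i].length := by omega
      rw [hr]
      simp only [if_pos hi, Option.map_eq_map, Option.map_some, Option.bind_some]
      rw [List.getElem?_set]
      by_cases hj : q.1.toNat = j
      · have hq : q = ((j : Int), (i : Int)) := by
          obtain ⟨a, b⟩ := q; simp only [Prod.mk.injEq]; constructor <;> omega
        rw [if_pos hj, if_pos (by omega : q.1.toNat < g[i].length)]
        rw [if_pos ⟨hq, by simp [List.getElem?_eq_getElem (by omega : j < g[i].length)]⟩]
      · have hq : ¬ q = ((j : Int), (i : Int)) := by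
          obtain ⟨a, b⟩ := q; simp only [Prod.mk.injEq]; intro ⟨ha, hb⟩; omega
        rw [if_neg hj, if_neg (by tauto)]
    · have hq : ¬ q = ((j : Int), (i : Int)) := by
        obtain ⟨a, b⟩ := q; simp only [Prod.mk.injEq]; intro ⟨ha, hb⟩; omega
      rw [if_neg (by tauto)]
      cases hg : g[i]? <;> simp [hi]
  · rename_i hc
    rw [if_neg]
    intro ⟨hq, hs⟩
    subst hq
    simp only [Int.toNat_natCast] at hc
    push Not at hc
    rcases Nat.lt_or_ge i g.length with hlt | hge
    · have hr : g[i]? = some g[i] := List.getElem?_eq_getElem hlt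
      rw [hr] at hs
      have := hc (by omega) (by omega) (by omega)
      rw [hr] at this
      simp only [Option.getD_some] at this
      simp only [Option.bind_some, Option.isSome_iff_exists] at hs
      obtain ⟨v, hv⟩ := hs
      obtain ⟨hjl, -⟩ := List.getElem?_eq_some_iff.mp hv
      omega
    · rw [List.getElem?_eq_none (by omega)] at hs
      simp at hs

theorem scatter_cell_isSome (g : List (List String)) (q : Int × Int) (i j : Nat) :
    (cellGet (pvScatter g q) i j).isSome = (cellGet g i j).isSome := by
  rw [scatter_cell]; split
  · rename_i h; simp [h.2]
  · rfl

theorem foldl_scatter_cell (p : List (Int × Int)) (g : List (List String)) (i j : Nat) :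
    cellGet (p.foldl pvScatter g) i j =
      if ((j : Int), (i : Int)) ∈ p ∧ (cellGet g i j).isSome then some ". "
      else cellGet g i j := by
  induction p generalizing g with
  | nil => simp
  | cons q rest ih =>
    simp only [List.foldl_cons, ih, scatter_cell_isSome, List.mem_cons]
    rw [scatter_cell]
    by_cases hs : (cellGet g i j).isSome
    · by_cases hq : q = ((j : Int), (i : Int)) <;>
        by_cases hm : ((j : Int), (i : Int)) ∈ rest <;>
        simp [hq, hm, hs, eq_comm]
    · simp [hs]

theorem scatter_length (g : List (List String)) (q : Int × Int) :
    (pvScatter g q).length = g.length := by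
  unfold pvScatter; split <;> simp

theorem foldl_scatter_length (p : List (Int × Int)) (g : List (List String)) :
    (p.foldl pvScatter g).length = g.length := by
  induction p generalizing g with
  | nil => rfl
  | cons q rest ih => simp [List.foldl_cons, ih, scatter_length]

theorem scatter_rowlen (g : List (List String)) (q : Int × Int) (i : Nat) :
    ((pvScatter g q)[i]?.map List.length) = (g[i]?.map List.length) := by
  unfold pvScatter; split
  · rw [List.getElem?_modify]
    cases h : g[i]? with
    | none => rfl
    | some r => simp only [Option.map_some]; split <;> simp
  · rfl

theorem foldl_scatter_rowlen (p : List (Int × Int)) (g : List (List String)) (i : Nat) :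
    ((p.foldl pvScatter g)[i]?.map List.length) = (g[i]?.map List.length) := by
  induction p generalizing g with
  | nil => rfl
  | cons q rest ih => simp [List.foldl_cons, ih, scatter_rowlen]

theorem chars_join_nil (l : List (List Char)) : PySem.Chars.join [] l = l.flatten := by
  induction l with
  | nil => simp [PySem.Chars.join_nil]
  | cons x tail ih =>
    cases tail with
    | nil => simp [PySem.Chars.join_singleton]
    | cons y rest => simp [PySem.Chars.join_cons_cons, ih]

theorem str_join_append_one (xs : List String) (y : String) :
    PySem.Str.join "" (xs ++ [y]) = PySem.Str.join "" xs ++ y := by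
  rw [← String.toList_inj]
  simp [String.toList_append, PySem.Str.toList_join, chars_join_nil]

theorem wall_cell (labyrinth : List (List Int)) (i j : Nat) :
    cellGet (labyrinth.map (fun row => row.map pvWall)) i j
      = (labyrinth[i]?.bind (fun r => r[j]?)).map pvWall := by
  unfold cellGet
  rw [List.getElem?_map]
  cases labyrinth[i]? <;> simp

theorem rows_eq (labyrinth : List (List Int)) (path : List (Int × Int)) :
    (path.foldl pvScatter (labyrinth.map (fun row => row.map pvWall))).map
        (fun row => PySem.Str.join "" row ++ "\n")
      = (PySem.List.enumerate labyrinth).map (fun p =>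
          PySem.Str.join "" (((PySem.List.enumerate p.2).map (fun q =>
            if (q.1, p.1) ∈ path then ". " else if q.2 == 0 then "##" else "  ")) ++ ["\n"])) := by
  apply List.ext_getElem?
  intro i
  rw [List.getElem?_map, List.getElem?_map, PySem.List.getElem?_enumerate]
  cases hrow : labyrinth[i]? with
  | none =>
    have : labyrinth.length ≤ i := List.getElem?_eq_none_iff.mp hrow
    rw [List.getElem?_eq_none (by simp [foldl_scatter_length, this])]
    simp
  | some row =>
    obtain ⟨hil, -⟩ := List.getElem?_eq_some_iff.mp hrow
    have hGlen : (path.foldl pvScatter (labyrinth.map (fun row => row.map pvWall))).length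
        = labyrinth.length := by simp [foldl_scatter_length]
    have hG : (path.foldl pvScatter (labyrinth.map (fun row => row.map pvWall)))[i]?
        = some ((path.foldl pvScatter (labyrinth.map (fun row => row.map pvWall)))[i]'(by omega)) :=
      List.getElem?_eq_getElem (by omega)
    set Gi := (path.foldl pvScatter (labyrinth.map (fun row => row.map pvWall)))[i]'(by omega) with hGi
    have hGirow : Gi.length = row.length := by
      have h := foldl_scatter_rowlen path (labyrinth.map (fun row => row.map pvWall)) i
      rw [hG, List.getElem?_map, hrow] at h
      simpa using h
    rw [hG]
    simp only [Option.map_some, Option.some.injEq]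
    have hcells : Gi = (PySem.List.enumerate row).map (fun q =>
        if (q.1, ((0 : Int) + (i : Int))) ∈ path then ". " else if q.2 == 0 then "##" else "  ") := by
      apply List.ext_getElem?
      intro j
      rw [List.getElem?_map, PySem.List.getElem?_enumerate]
      have hcell : Gi[j]? = cellGet (path.foldl pvScatter (labyrinth.map (fun row => row.map pvWall))) i j := by
        unfold cellGet; rw [hG, Option.bind_some]
      rw [hcell, foldl_scatter_cell, wall_cell, hrow, Option.bind_some]
      cases hj : row[j]? with
      | none => simp
      | some col =>
        obtain ⟨hjl, -⟩ := List.getElem?_eq_some_iff.mp hj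
        simp only [Option.map_some, Option.isSome_some, and_true, zero_add]
        by_cases hmem : ((j : Int), (i : Int)) ∈ path <;> simp [hmem, pvWall]
    rw [hcells, ← str_join_append_one]

-- ===== VERDICT (by name: the statement is the Claim_ definition above) =====
theorem draw_labyrinth_spec : Claim_equal_draw_labyrinth := by
  intro labyrinth path _
  unfold Spec_draw_labyrinth draw_labyrinth draw_labyrinth_alt
  rw [rows_eq]
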